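-- pv_equiv track=rewrite | github.com/yojun313/knpu | MANAGER/Kemkim.py | filter_dic_empty_list
-- ===== SOURCE A (Python) =====
-- def filter_dic_empty_list(dictionary):
--
--     # 딕셔너리의 키 리스트를 역순으로 가져옴
--     keys = list(dictionary.keys())
--
--     # 역순으로 검사하여 빈 리스트나 NaN이 포함된 리스트를 가진 key를 제거
--     for key in reversed(keys):
--         value = dictionary[key]
--         if not value:
--             del dictionary[key]
--         else:
--             break  # 빈 리스트가 아니고 NaN도 없으면 멈춤
--
--     return dictionary
-- ===== SOURCE B (Python) =====
-- def filter_dic_empty_list(dictionary):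
--     # Forward single pass: compute how many leading entries to keep (up to and
--     # including the last non-empty value), then delete the keys past that point.
--     keep = 0
--     for i, value in enumerate(dictionary.values()):
--         if value:
--             keep = i + 1
--     for key in list(dictionary.keys())[keep:]:
--         del dictionary[key]
--     return dictionary
-- ===== Notes on version B (the rewrite author's own statement) =====
-- stated objective: alternative
-- what changed: B replaces A's backward scan with break-and-delete by a forward pass that computes the index after the last non-empty value, then a staged second pass deleting exactly the keys beyond that cut.
import Mathlib
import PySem

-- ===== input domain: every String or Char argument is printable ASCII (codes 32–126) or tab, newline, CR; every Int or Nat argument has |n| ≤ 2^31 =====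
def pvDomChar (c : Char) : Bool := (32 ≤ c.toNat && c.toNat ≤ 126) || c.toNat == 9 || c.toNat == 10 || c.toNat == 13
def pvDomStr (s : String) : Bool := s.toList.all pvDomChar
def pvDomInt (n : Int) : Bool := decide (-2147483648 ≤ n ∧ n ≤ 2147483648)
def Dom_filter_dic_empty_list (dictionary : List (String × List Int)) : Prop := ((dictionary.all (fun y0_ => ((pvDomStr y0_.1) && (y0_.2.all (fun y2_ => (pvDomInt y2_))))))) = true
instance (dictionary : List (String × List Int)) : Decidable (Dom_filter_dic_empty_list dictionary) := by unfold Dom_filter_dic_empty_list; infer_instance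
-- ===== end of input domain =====

-- B replaces A's backward scan with break-and-delete by a forward pass computing
-- the cut after the last non-empty value plus a staged deletion pass (alternative).
-- Both A and B mutate the passed dict in place and return it; the equivalence
-- proved here is about the returned value.


-- ===== PORT A =====
-- for key in reversed(keys): value = dictionary[key]; if not value: del dictionary[key] else: break
def filterA_loop : List String → PySem.Dict String (List Int) → PySem.Dict String (List Int)
  | [], d => d
  | k :: ks, d =>
    match d.get? k with
    | some value => if value = [] then filterA_loop ks (d.erase k) else d
    | none => d  -- dictionary[key] raises KeyError; unreachable on a genuine dict (Pre_)

def filter_dic_empty_list (dictionary : List (String × List Int)) : List (String × List Int) :=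
  let keys := (PySem.Dict.mk dictionary).keys
  (filterA_loop keys.reverse (PySem.Dict.mk dictionary)).items

-- ===== PORT B =====
-- keep = 0; for i, value in enumerate(dictionary.values()): if value: keep = i + 1
-- for key in list(dictionary.keys())[keep:]: del dictionary[key]
def filter_dic_empty_list_alt (dictionary : List (String × List Int)) : List (String × List Int) :=
  let d := PySem.Dict.mk dictionary
  let keep := (PySem.List.enumerate d.values 0).foldl
      (fun keep p => if p.2 ≠ [] then p.1 + 1 else keep) 0
  ((PySem.List.slice d.keys (some keep) none).foldl (fun d k => d.erase k) d).items

-- ===== PRECONDITION & SPEC =====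
-- Pre_ excludes association lists with duplicate keys: a Python dict can never
-- contain them, so such lists represent no input the Python function is run on.
def Pre_filter_dic_empty_list (dictionary : List (String × List Int)) : Prop :=
  (dictionary.map Prod.fst).Nodup
instance (dictionary : List (String × List Int)) : Decidable (Pre_filter_dic_empty_list dictionary) := by unfold Pre_filter_dic_empty_list; infer_instance
def pvWitness_filter_dic_empty_list : (List (String × List Int)) := [("a", [1]), ("b", [])]

def Spec_filter_dic_empty_list (dictionary : List (String × List Int)) (out : List (String × List Int)) : Prop := out = filter_dic_empty_list_alt dictionary
instance (dictionary : List (String × List Int)) (out : List (String × List Int)) : Decidable (Spec_filter_dic_empty_list dictionary out) := by unfold Spec_filter_dic_empty_list; infer_instance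

-- ===== CLAIM (what is proved, stated in full; the proofs are below) =====
def Claim_equal_filter_dic_empty_list : Prop := ∀ (dictionary : List (String × List Int)), Dom_filter_dic_empty_list dictionary → Pre_filter_dic_empty_list dictionary → Spec_filter_dic_empty_list dictionary (filter_dic_empty_list dictionary)

-- ===== LEMMAS AND PROOFS =====

-- number of leading entries up to (and including) the last non-empty value
def kNat (l : List (String × List Int)) : Nat :=
  (l.reverse.dropWhile (fun p => decide (p.2 = []))).length

theorem kNat_concat (l : List (String × List Int)) (k : String) (v : List Int) :
    kNat (l ++ [(k, v)]) = if v = [] then kNat l else l.length + 1 := by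
  unfold kNat
  rw [List.reverse_append]
  by_cases h : v = []
  · simp [h]
  · simp [h]

theorem kNat_le (l : List (String × List Int)) : kNat l ≤ l.length := by
  unfold kNat
  calc (l.reverse.dropWhile (fun p => decide (p.2 = []))).length
      ≤ l.reverse.length := List.length_dropWhile_le _ _
    _ = l.length := List.length_reverse

-- B's first loop computes kNat
theorem keep_eq_kNat (l : List (String × List Int)) :
    (PySem.List.enumerate (l.map Prod.snd) 0).foldl
      (fun keep p => if p.2 ≠ [] then p.1 + 1 else keep) 0 = (kNat l : Int) := by
  induction l using List.reverseRecOn with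
  | nil => simp [kNat]
  | append_singleton l p ih =>
    obtain ⟨k, v⟩ := p
    rw [List.map_append, PySem.List.enumerate_append, List.foldl_append, ih, kNat_concat]
    by_cases h : v = []
    · simp [h, PySem.List.enumerate]
    · simp [h, PySem.List.enumerate]

-- fold of erase = one filter over the items
theorem foldl_erase_items (ks : List String) (d : PySem.Dict String (List Int)) :
    (ks.foldl (fun d k => d.erase k) d).items
      = d.items.filter (fun p => !(ks.contains p.1)) := by
  induction ks generalizing d with
  | nil => simp
  | cons k ks ih =>
    rw [List.foldl_cons, ih]
    show ((PySem.Dict.erase d k).items.filter _) = _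
    simp only [PySem.Dict.erase, List.filter_filter]
    apply List.filter_congr
    intro p _
    by_cases h : p.1 = k <;> simp [h]

-- filtering out the keys of the dropped tail = take, when keys are unique
theorem filter_drop_contains (l : List (String × List Int)) (n : Nat)
    (hnd : (l.map Prod.fst).Nodup) :
    l.filter (fun p => !(((l.map Prod.fst).drop n).contains p.1)) = l.take n := by
  rw [← List.map_drop]
  have key : ∀ (t r : List (String × List Int)), (t.map Prod.fst ++ r.map Prod.fst).Nodup →
      (t ++ r).filter (fun p => !((r.map Prod.fst).contains p.1)) = t := by
    intro t r hn
    have hdisj := List.disjoint_of_nodup_append hn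
    rw [List.filter_append]
    have h1 : t.filter (fun p => !((r.map Prod.fst).contains p.1)) = t := by
      apply List.filter_eq_self.mpr
      intro p hp
      have : p.1 ∉ r.map Prod.fst := hdisj (List.mem_map_of_mem hp)
      simpa using this
    have h2 : r.filter (fun p => !((r.map Prod.fst).contains p.1)) = [] := by
      apply List.filter_eq_nil_iff.mpr
      intro p hp
      have : p.1 ∈ r.map Prod.fst := List.mem_map_of_mem hp
      simpa using this
    rw [h1, h2, List.append_nil]
  calc l.filter (fun p => !(((l.drop n).map Prod.fst).contains p.1))
      = (l.take n ++ l.drop n).filter (fun p => !(((l.drop n).map Prod.fst).contains p.1)) := by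
        rw [List.take_append_drop]
    _ = l.take n := key _ _ (by rw [← List.map_append, List.take_append_drop]; exact hnd)

theorem erase_concat (l : List (String × List Int)) (k : String) (v : List Int)
    (h : k ∉ l.map Prod.fst) :
    (PySem.Dict.mk (l ++ [(k, v)])).erase k = PySem.Dict.mk l := by
  apply PySem.Dict.ext
  simp only [PySem.Dict.erase, List.filter_append]
  rw [List.filter_eq_self.mpr, List.filter_eq_nil_iff.mpr]
  · simp
  · simp
  · intro p hp
    have hne : p.1 ≠ k := fun e => h (e ▸ List.mem_map_of_mem hp)
    simp [hne]

theorem get?_concat (l : List (String × List Int)) (k : String) (v : List Int)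
    (hnd : ((l ++ [(k, v)]).map Prod.fst).Nodup) :
    (PySem.Dict.mk (l ++ [(k, v)])).get? k = some v := by
  apply PySem.Dict.get?_of_mem_items
  · simp
  · simpa using hnd

-- A's loop leaves exactly the first kNat entries
theorem loopA_take (l : List (String × List Int)) (h : (l.map Prod.fst).Nodup) :
    (filterA_loop ((l.map Prod.fst).reverse) (PySem.Dict.mk l)).items
      = l.take (kNat l) := by
  induction l using List.reverseRecOn with
  | nil => simp [filterA_loop, kNat]
  | append_singleton l p ih =>
    obtain ⟨k, v⟩ := p
    have hmap : (l ++ [(k, v)]).map Prod.fst = l.map Prod.fst ++ [k] := by simp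
    rw [hmap] at h
    have hk : k ∉ l.map Prod.fst := by
      intro hm
      exact (List.disjoint_of_nodup_append h) hm (by simp)
    have hl : (l.map Prod.fst).Nodup := h.of_append_left
    rw [hmap, List.reverse_append, kNat_concat]
    simp only [List.reverse_singleton, List.singleton_append, filterA_loop,
      get?_concat l k v (by rw [hmap]; exact h)]
    by_cases hv : v = []
    · rw [if_pos hv, if_pos hv, erase_concat l k v hk,
        List.take_append_of_le_length (kNat_le l)]
      exact ih hl
    · rw [if_neg hv, if_neg hv]
      show (PySem.Dict.mk (l ++ [(k, v)])).items = _
      rw [List.take_of_length_le (by simp)]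

-- B leaves exactly the first kNat entries too
theorem alt_take (l : List (String × List Int)) (h : (l.map Prod.fst).Nodup) :
    filter_dic_empty_list_alt l = l.take (kNat l) := by
  unfold filter_dic_empty_list_alt
  have hvals : (PySem.Dict.mk l).values = l.map Prod.snd := by simp
  have hkeys : (PySem.Dict.mk l).keys = l.map Prod.fst := by simp
  simp only [hvals, hkeys, keep_eq_kNat,
    PySem.List.slice_from _ (by positivity : (0:Int) ≤ (kNat l : Int)),
    Int.toNat_natCast]
  rw [foldl_erase_items]
  show l.filter _ = _
  exact filter_drop_contains l (kNat l) h

-- ===== VERDICT (by name: the statement is the Claim_ definition above) =====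
theorem filter_dic_empty_list_spec : Claim_equal_filter_dic_empty_list := by
  intro dictionary _ hpre
  unfold Spec_filter_dic_empty_list filter_dic_empty_list
  have hkeys : (PySem.Dict.mk dictionary).keys = dictionary.map Prod.fst := by simp
  rw [hkeys, loopA_take dictionary hpre, alt_take dictionary hpre]
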